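-- pv_equiv track=rewrite | github.com/wukevin/ortiz-ucsf-bioinformatics | util/fileUtil.py | getCellLineFromFilename
-- ===== SOURCE A (Python) =====
-- def getCellLineFromFilename(f, delim = "_"):
--     # Assumes that the cell line is the first part of the name
--     f = f.split(".")[0] # Removes file extension
--     splitted = f.split(delim)
--     if "Trinity" in splitted or "Cufflinks" in splitted or "Stringtie" in splitted:
--         b = max([splitted.index(x) for x in ["Trinity", "Cufflinks", "Stringtie"] if x in splitted])
--         line = "-".join(splitted[0:b])
--     else:
--         line = splitted[0]
--     return line
-- ===== SOURCE B (Python) =====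
-- def getCellLineFromFilename(f, delim = "_"):
--     # One forward pass: track the latest first occurrence of any marker token.
--     splitted = f.split(".")[0].split(delim)
--     seen_t = seen_c = seen_s = False
--     b = -1
--     for i, tok in enumerate(splitted):
--         if tok == "Trinity" and not seen_t:
--             seen_t = True
--             b = i
--         elif tok == "Cufflinks" and not seen_c:
--             seen_c = True
--             b = i
--         elif tok == "Stringtie" and not seen_s:
--             seen_s = True
--             b = i
--     if b >= 0:
--         return "-".join(splitted[0:b])
--     return splitted[0]
-- ===== Notes on version B (the rewrite author's own statement) =====
-- stated objective: simpler
-- what changed: A's three membership scans plus a max-over-.index comprehension are replaced by a single forward pass over the tokens that tracks three seen flags and the latest first-occurrence index of a marker.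
import Mathlib
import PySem

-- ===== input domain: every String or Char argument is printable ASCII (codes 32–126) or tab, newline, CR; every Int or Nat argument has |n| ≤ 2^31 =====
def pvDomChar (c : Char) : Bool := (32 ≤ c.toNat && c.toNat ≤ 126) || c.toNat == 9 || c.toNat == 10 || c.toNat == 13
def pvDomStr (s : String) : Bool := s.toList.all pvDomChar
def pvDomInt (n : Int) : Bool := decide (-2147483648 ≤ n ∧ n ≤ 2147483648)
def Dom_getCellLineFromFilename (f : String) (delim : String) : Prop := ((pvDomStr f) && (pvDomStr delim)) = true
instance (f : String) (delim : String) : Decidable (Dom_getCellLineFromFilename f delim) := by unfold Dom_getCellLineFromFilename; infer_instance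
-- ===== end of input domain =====

-- B replaces A's three membership scans plus the max-over-.index comprehension by one
-- forward pass that records the latest first occurrence of a marker (objective: simpler).

-- ===== PORT A =====
-- the marker list A iterates over in its comprehension
def pvMarkers : List String := ["Trinity", "Cufflinks", "Stringtie"]

def getCellLineFromFilename (f : String) (delim : String) : String :=
  -- f = f.split(".")[0]  ("." is a nonempty separator, so split? is some and the list nonempty)
  let f2 := (PySem.List.pyGet? ((PySem.Str.split? f ".").getD []) 0).getD ""
  -- splitted = f.split(delim)  (an empty delim raises ValueError: excluded by Pre_)
  let splitted := (PySem.Str.split? f2 delim).getD []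
  if "Trinity" ∈ splitted ∨ "Cufflinks" ∈ splitted ∨ "Stringtie" ∈ splitted then
    let idxs := (pvMarkers.filter (fun x => decide (x ∈ splitted))).map
      (fun x => (PySem.List.index? splitted x).getD 0)
    let b := (PySem.List.max? idxs (fun x => x)).getD 0
    PySem.Str.join "-" (PySem.List.slice splitted (some 0) (some (b : Int)))
  else
    (PySem.List.pyGet? splitted 0).getD ""

-- ===== PORT B =====
-- Source B's for-loop over enumerate(splitted) with the three seen flags and the running b
def pvAltLoop : List String → Nat → Bool → Bool → Bool → Int → Int
  | [], _, _, _, _, b => b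
  | tok :: rest, i, st, sc, ss, b =>
    if tok = "Trinity" ∧ st = false then pvAltLoop rest (i + 1) true sc ss (i : Int)
    else if tok = "Cufflinks" ∧ sc = false then pvAltLoop rest (i + 1) st true ss (i : Int)
    else if tok = "Stringtie" ∧ ss = false then pvAltLoop rest (i + 1) st sc true (i : Int)
    else pvAltLoop rest (i + 1) st sc ss b

def getCellLineFromFilename_alt (f : String) (delim : String) : String :=
  let splitted :=
    (PySem.Str.split? ((PySem.List.pyGet? ((PySem.Str.split? f ".").getD []) 0).getD "") delim).getD []
  let b := pvAltLoop splitted 0 false false false (-1)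
  if 0 ≤ b then PySem.Str.join "-" (PySem.List.slice splitted (some 0) (some b))
  else (PySem.List.pyGet? splitted 0).getD ""

-- ===== PRECONDITION & SPEC =====
-- Pre_ excludes only the empty delimiter, on which str.split raises ValueError in A (and in B alike).
def Pre_getCellLineFromFilename (f : String) (delim : String) : Prop := delim ≠ ""
instance (f : String) (delim : String) : Decidable (Pre_getCellLineFromFilename f delim) := by
  unfold Pre_getCellLineFromFilename; infer_instance

def pvWitness_getCellLineFromFilename : String × String := ("HeLa_Trinity_x.fasta", "_")

def Spec_getCellLineFromFilename (f : String) (delim : String) (out : String) : Prop :=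
  out = getCellLineFromFilename_alt f delim
instance (f : String) (delim : String) (out : String) : Decidable (Spec_getCellLineFromFilename f delim out) := by
  unfold Spec_getCellLineFromFilename; infer_instance

-- ===== CLAIM (what is proved, stated in full; the proofs are below) =====
def Claim_equal_getCellLineFromFilename : Prop :=
  ∀ (f : String) (delim : String), Dom_getCellLineFromFilename f delim →
    Pre_getCellLineFromFilename f delim →
    Spec_getCellLineFromFilename f delim (getCellLineFromFilename f delim)

-- ===== LEMMAS AND PROOFS =====

-- what B's loop has found so far, as a function of the remaining list and the seen flags
def pvBest : List String → Bool → Bool → Bool → Option Nat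
  | [], _, _, _ => none
  | tok :: rest, st, sc, ss =>
    if tok = "Trinity" ∧ st = false then some ((pvBest rest true sc ss).elim 0 (· + 1))
    else if tok = "Cufflinks" ∧ sc = false then some ((pvBest rest st true ss).elim 0 (· + 1))
    else if tok = "Stringtie" ∧ ss = false then some ((pvBest rest st sc true).elim 0 (· + 1))
    else (pvBest rest st sc ss).map (· + 1)

lemma pvAltLoop_spec (l : List String) : ∀ (i : Nat) (st sc ss : Bool) (b : Int),
    pvAltLoop l i st sc ss b =
      match pvBest l st sc ss with
      | some m => (i : Int) + m
      | none => b := by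
  induction l with
  | nil => intro i st sc ss b; simp [pvAltLoop, pvBest]
  | cons tok rest ih =>
    intro i st sc ss b
    rw [pvAltLoop, pvBest]
    split_ifs with g1 g2 g3 <;> rw [ih]
    · rcases pvBest rest true sc ss with _ | m <;> simp only [Option.elim] <;> push_cast <;> ring
    · rcases pvBest rest st true ss with _ | m <;> simp only [Option.elim] <;> push_cast <;> ring
    · rcases pvBest rest st sc true with _ | m <;> simp only [Option.elim] <;> push_cast <;> ring
    · rcases pvBest rest st sc ss with _ | m <;> simp only [Option.map] <;> push_cast <;> ring

-- pvBest computes the max of the first-occurrence indices of the not-yet-seen markers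
lemma pvBest_spec (l : List String) : ∀ (st sc ss : Bool),
    pvBest l st sc ss =
      ([(if st then none else PySem.List.index? l "Trinity"),
        (if sc then none else PySem.List.index? l "Cufflinks"),
        (if ss then none else PySem.List.index? l "Stringtie")].filterMap id).max? := by
  induction l with
  | nil => intro st sc ss; rcases st <;> rcases sc <;> rcases ss <;> simp [pvBest]
  | cons tok rest ih =>
    intro st sc ss
    rw [pvBest]
    by_cases hT : tok = "Trinity" <;> by_cases hC : tok = "Cufflinks" <;>
      by_cases hS : tok = "Stringtie"
    · exact absurd (hT ▸ hC) (by decide)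
    · exact absurd (hT ▸ hC) (by decide)
    · exact absurd (hT ▸ hS) (by decide)
    · subst hT
      rcases st <;> rcases sc <;> rcases ss <;>
        rcases hoT : PySem.List.index? rest "Trinity" with _ | a <;>
        rcases hoC : PySem.List.index? rest "Cufflinks" with _ | b <;>
        rcases hoS : PySem.List.index? rest "Stringtie" with _ | c <;>
        simp [-PySem.List.index?_eq_idxOf?, PySem.List.index?_cons_self,
          PySem.List.index?_cons_of_ne, ih, hoT, hoC, hoS, List.max?, List.foldl] <;> omega
    · exact absurd (hC ▸ hS) (by decide)
    · subst hC
      rcases st <;> rcases sc <;> rcases ss <;>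
        rcases hoT : PySem.List.index? rest "Trinity" with _ | a <;>
        rcases hoC : PySem.List.index? rest "Cufflinks" with _ | b <;>
        rcases hoS : PySem.List.index? rest "Stringtie" with _ | c <;>
        simp [-PySem.List.index?_eq_idxOf?, PySem.List.index?_cons_self,
          PySem.List.index?_cons_of_ne, ih, hoT, hoC, hoS, List.max?, List.foldl] <;> omega
    · subst hS
      rcases st <;> rcases sc <;> rcases ss <;>
        rcases hoT : PySem.List.index? rest "Trinity" with _ | a <;>
        rcases hoC : PySem.List.index? rest "Cufflinks" with _ | b <;>
        rcases hoS : PySem.List.index? rest "Stringtie" with _ | c <;>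
        simp [-PySem.List.index?_eq_idxOf?, PySem.List.index?_cons_self,
          PySem.List.index?_cons_of_ne, ih, hoT, hoC, hoS, List.max?, List.foldl] <;> omega
    · rcases st <;> rcases sc <;> rcases ss <;>
        rcases hoT : PySem.List.index? rest "Trinity" with _ | a <;>
        rcases hoC : PySem.List.index? rest "Cufflinks" with _ | b <;>
        rcases hoS : PySem.List.index? rest "Stringtie" with _ | c <;>
        simp [-PySem.List.index?_eq_idxOf?, PySem.List.index?_cons_self,
          PySem.List.index?_cons_of_ne, ih, hT, hC, hS, hoT, hoC, hoS, List.max?, List.foldl]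

-- A's branch-and-comprehension and B's single pass agree on any token list
lemma core_eq (l : List String) :
    (if "Trinity" ∈ l ∨ "Cufflinks" ∈ l ∨ "Stringtie" ∈ l then
       let idxs := (pvMarkers.filter (fun x => decide (x ∈ l))).map
         (fun x => (PySem.List.index? l x).getD 0)
       let b := (PySem.List.max? idxs (fun x => x)).getD 0
       PySem.Str.join "-" (PySem.List.slice l (some 0) (some (b : Int)))
     else (PySem.List.pyGet? l 0).getD "") =
    (let b := pvAltLoop l 0 false false false (-1)
     if 0 ≤ b then PySem.Str.join "-" (PySem.List.slice l (some 0) (some b))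
     else (PySem.List.pyGet? l 0).getD "") := by
  have hloop := pvAltLoop_spec l 0 false false false (-1)
  rw [pvBest_spec] at hloop
  simp only [Bool.false_eq_true, if_false] at hloop
  rcases hoT : PySem.List.index? l "Trinity" with _ | a <;>
    rcases hoC : PySem.List.index? l "Cufflinks" with _ | b <;>
    rcases hoS : PySem.List.index? l "Stringtie" with _ | c <;>
    rw [hoT, hoC, hoS] at hloop <;>
    simp only [List.filterMap, id, List.max?, List.foldl] at hloop <;>
    simp [-PySem.List.index?_eq_idxOf?, hloop, pvMarkers, ← PySem.List.index?_isSome_iff,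
      hoT, hoC, hoS, PySem.List.max?_id_cons, List.foldl]

-- ===== VERDICT (by name: the statement is the Claim_ definition above) =====
theorem getCellLineFromFilename_spec : Claim_equal_getCellLineFromFilename := by
  intro f delim _ _
  unfold Spec_getCellLineFromFilename getCellLineFromFilename getCellLineFromFilename_alt
  exact core_eq _
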